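-- pv_equiv track=rewrite | github.com/smargetic/CSE_537-Artificial_Intelligence | Homework3/q1_classifier.py | uniformOutput
-- ===== SOURCE A (Python) =====
-- def uniformOutput(current_data_set, output):
--     outputList = []
--     for i in current_data_set.keys():
--         if(output[i] not in outputList):
--             outputList.append(output[i])
--         if(len(outputList)>1):
--             return False
--     return True
-- ===== SOURCE B (Python) =====
-- def uniformOutput(current_data_set, output):
--     values = [output[i] for i in current_data_set.keys()]
--     return values[1:] == values[:-1]
-- ===== Notes on version B (the rewrite author's own statement) =====
-- stated objective: idiomatic
-- what changed: B replaces A's early-exiting loop with a bounded deduplication list by two staged passes: first build the full list of values for all keys, then decide uniformity by the classic slice comparison values[1:] == values[:-1] (no loop, no early exit, no accumulator).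
-- outside the precondition, e.g. on uniformOutput({'a': 0, 'b': 1, 'c': 2}, {'a': 0, 'b': 1}): A returns False, B raises KeyError
import Mathlib
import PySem

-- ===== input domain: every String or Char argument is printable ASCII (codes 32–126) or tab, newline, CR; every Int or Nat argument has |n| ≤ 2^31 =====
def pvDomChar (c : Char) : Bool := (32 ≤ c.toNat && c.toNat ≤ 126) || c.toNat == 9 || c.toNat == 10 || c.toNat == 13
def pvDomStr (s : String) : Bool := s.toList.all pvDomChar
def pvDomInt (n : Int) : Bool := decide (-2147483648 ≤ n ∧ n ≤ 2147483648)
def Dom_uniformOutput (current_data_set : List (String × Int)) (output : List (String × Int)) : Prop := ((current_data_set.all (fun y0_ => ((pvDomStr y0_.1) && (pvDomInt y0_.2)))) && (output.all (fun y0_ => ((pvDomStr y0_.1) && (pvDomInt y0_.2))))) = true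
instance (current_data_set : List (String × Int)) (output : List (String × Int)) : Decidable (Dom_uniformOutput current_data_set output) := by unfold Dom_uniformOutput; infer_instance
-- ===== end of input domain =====

-- B builds the full list of values in one comprehension and decides uniformity by the slice comparison values[1:] == values[:-1], replacing A's early-exiting loop with a deduplication list (idiomatic, same cost).


-- ===== PORT A =====
-- the loop 'for i in current_data_set.keys(): …' with the accumulator outputList
def uniformOutputGo (o : PySem.Dict String Int) : List String → List Int → Bool
  | [], _ => true
  | k :: rest, outputList =>
    match o.get? k with
    | none => false      -- output[i] raises KeyError here; excluded by Pre_uniformOutput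
    | some v =>
      let outputList' := if v ∈ outputList then outputList else outputList ++ [v]
      if outputList'.length > 1 then false else uniformOutputGo o rest outputList'

def uniformOutput (current_data_set : List (String × Int)) (output : List (String × Int)) : Bool :=
  uniformOutputGo (PySem.Dict.ofList output) (PySem.Dict.ofList current_data_set).keys []

-- ===== PORT B =====
-- values is the comprehension [output[i] for i in keys]; a lookup that would raise KeyError is
-- carried as 'none' (those inputs are excluded by Pre_uniformOutput, where every lookup is 'some').
def uniformOutput_alt (current_data_set : List (String × Int)) (output : List (String × Int)) : Bool :=
  let o := PySem.Dict.ofList output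
  let values : List (Option Int) := (PySem.Dict.ofList current_data_set).keys.map o.get?
  PySem.List.slice values (some 1) none == PySem.List.slice values none (some (-1))

-- ===== PRECONDITION & SPEC =====
-- Pre_ excludes every input with a key of current_data_set missing from output: there B's
-- comprehension raises KeyError, while A either raises KeyError too or (having already met two
-- distinct values) returns False early — see claim.json cites.
def Pre_uniformOutput (current_data_set : List (String × Int)) (output : List (String × Int)) : Prop :=
  ∀ p ∈ current_data_set, p.1 ∈ output.map Prod.fst
instance (current_data_set : List (String × Int)) (output : List (String × Int)) : Decidable (Pre_uniformOutput current_data_set output) := by unfold Pre_uniformOutput; infer_instance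

def pvWitness_uniformOutput : (List (String × Int)) × (List (String × Int)) :=
  ([("a", 1), ("b", 1)], [("a", 1), ("b", 1), ("c", 2)])

def Spec_uniformOutput (current_data_set : List (String × Int)) (output : List (String × Int)) (out : Bool) : Prop := out = uniformOutput_alt current_data_set output
instance (current_data_set : List (String × Int)) (output : List (String × Int)) (out : Bool) : Decidable (Spec_uniformOutput current_data_set output out) := by unfold Spec_uniformOutput; infer_instance

-- ===== CLAIM (what is proved, stated in full; the proofs are below) =====
def Claim_equal_uniformOutput : Prop := ∀ (current_data_set : List (String × Int)) (output : List (String × Int)), Dom_uniformOutput current_data_set output → Pre_uniformOutput current_data_set output → Spec_uniformOutput current_data_set output (uniformOutput current_data_set output)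

-- ===== LEMMAS AND PROOFS =====

-- keys of ofList l are exactly the distinct first components of l
theorem mem_keys_ofList {l : List (String × Int)} {k : String} :
    k ∈ (PySem.Dict.ofList l).keys ↔ k ∈ l.map Prod.fst := by
  have h := PySem.Dict.keys_foldl_insert_key (ν := Int) l Prod.fst (fun _ p => p.2) PySem.Dict.empty
  have : (PySem.Dict.ofList l).keys = PySem.Set.update PySem.Dict.empty.keys (l.map Prod.fst) := h
  rw [this]
  have : (PySem.Dict.empty : PySem.Dict String Int).keys = [] := rfl
  rw [this, PySem.Set.update_nil_left, PySem.Set.mem_ofList]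

-- invariant: once the deduplication list is the singleton [v], A's loop just tests
-- that every remaining key's output equals v
theorem go_singleton (o : PySem.Dict String Int) (keys : List String) (v : Int)
    (h : ∀ k ∈ keys, (o.get? k).isSome) :
    uniformOutputGo o keys [v] = keys.all (fun k => o.get? k == some v) := by
  induction keys with
  | nil => rfl
  | cons k rest ih =>
    have hk : (o.get? k).isSome := h k (List.mem_cons_self ..)
    obtain ⟨w, hw⟩ := Option.isSome_iff_exists.mp hk
    simp only [uniformOutputGo, hw, List.all_cons]
    by_cases hvw : w = v
    · subst hvw
      simp [ih (fun k hk => h k (List.mem_cons_of_mem _ hk))]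
    · simp [hvw]

-- the slice test: l = (v :: l).dropLast  ↔  every element of l is v
theorem tail_eq_dropLast_iff (v : Option Int) (l : List (Option Int)) :
    (l = (v :: l).dropLast) ↔ (∀ x ∈ l, x = v) := by
  induction l generalizing v with
  | nil => simp
  | cons w l' ih =>
    rw [show (v :: w :: l').dropLast = v :: (w :: l').dropLast from rfl]
    constructor
    · rintro h
      obtain ⟨hw, hl⟩ := List.cons.inj h
      intro x hx
      rcases List.mem_cons.mp hx with hx | hx
      · exact hx.trans hw
      · exact ((ih w).mp (hw ▸ hl) x hx).trans hw
    · intro h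
      have hw : w = v := h w (List.mem_cons_self ..)
      subst hw
      have : l' = (w :: l').dropLast :=
        (ih w).mpr (fun x hx => h x (List.mem_cons_of_mem _ hx))
      rw [← this]

theorem uniformOutput_spec' (current_data_set : List (String × Int)) (output : List (String × Int))
    (hpre : Pre_uniformOutput current_data_set output) :
    uniformOutput current_data_set output = uniformOutput_alt current_data_set output := by
  unfold uniformOutput uniformOutput_alt
  have hsome : ∀ k ∈ (PySem.Dict.ofList current_data_set).keys,
      ((PySem.Dict.ofList output).get? k).isSome := by
    intro k hk
    have hk' : k ∈ current_data_set.map Prod.fst := mem_keys_ofList.mp hk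
    obtain ⟨p, hp, hpk⟩ := List.mem_map.mp hk'
    have : k ∈ output.map Prod.fst := hpk ▸ hpre p hp
    have hmem : k ∈ (PySem.Dict.ofList output).keys := mem_keys_ofList.mpr this
    rcases hcase : (PySem.Dict.ofList output).get? k with _ | w
    · exact absurd ((PySem.Dict.get?_eq_none_iff_not_mem_keys _ _).mp hcase) (not_not_intro hmem)
    · rfl
  dsimp only
  rw [PySem.List.slice_from_one, PySem.List.slice_to_neg_one]
  rcases hkeys : (PySem.Dict.ofList current_data_set).keys with _ | ⟨k0, rest⟩
  · rfl
  · have hk0 : ((PySem.Dict.ofList output).get? k0).isSome := by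
      apply hsome; rw [hkeys]; exact List.mem_cons_self ..
    obtain ⟨v, hv⟩ := Option.isSome_iff_exists.mp hk0
    simp only [List.map_cons, List.tail_cons, uniformOutputGo, hv]
    norm_num
    rw [go_singleton _ rest v (fun k hk => by
      apply hsome; rw [hkeys]; exact List.mem_cons_of_mem _ hk)]
    rw [Bool.eq_iff_iff]
    simp only [List.all_eq_true, beq_iff_eq, tail_eq_dropLast_iff]
    constructor
    · intro h x hx
      obtain ⟨k, hk, hkx⟩ := List.mem_map.mp hx
      rw [← hkx]; exact h k hk
    · intro h k hk
      exact h _ (List.mem_map_of_mem hk)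

-- ===== VERDICT (by name: the statement is the Claim_ definition above) =====
theorem uniformOutput_spec : Claim_equal_uniformOutput := by
  intro cds out _ hpre
  exact uniformOutput_spec' cds out hpre
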